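-- pv_equiv track=rewrite | github.com/zsjoel04/mooc-python-exercises | part6/part06-15/word_search.py | dot_checker
-- ===== SOURCE A (Python) =====
-- def dot_checker(word: str, search_term: str):
--     new_list = []
--     #alphabet = [letter for letter in string.ascii_lowercase]
--     if len(search_term) == len(word):
--         for i in range(len(search_term)):
--             if search_term[i] == word[i]:
--                 new_list.append(word[i])
--             elif search_term[i] == ".":# and word[i] in alphabet:
--                 new_list.append(word[i])
--     result = "".join(new_list)
--     if not result == "":
--         if_true = word == result
--         if if_true:
--             return result
-- ===== SOURCE B (Python) =====
-- def dot_checker(word: str, search_term: str):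
--     if word and len(word) == len(search_term) and all(
--             s == '.' or s == w for w, s in zip(word, search_term)):
--         return word
--     return None
-- ===== Notes on version B (the rewrite author's own statement) =====
-- stated objective: simpler
-- what changed: Replaces the list-building index loop plus join-and-compare with a single short-circuiting all() predicate over zip(word, search_term), returning word directly.
import Mathlib
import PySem

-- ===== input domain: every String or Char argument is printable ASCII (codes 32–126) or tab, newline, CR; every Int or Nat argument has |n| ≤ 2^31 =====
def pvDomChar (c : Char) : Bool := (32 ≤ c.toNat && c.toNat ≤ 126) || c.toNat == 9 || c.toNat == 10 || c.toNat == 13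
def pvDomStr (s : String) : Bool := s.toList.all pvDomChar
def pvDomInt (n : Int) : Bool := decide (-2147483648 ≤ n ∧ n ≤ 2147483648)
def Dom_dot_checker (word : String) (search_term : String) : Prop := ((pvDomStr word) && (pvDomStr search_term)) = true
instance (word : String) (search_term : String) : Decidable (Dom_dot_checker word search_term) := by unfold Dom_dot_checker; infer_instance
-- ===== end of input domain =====

-- B replaces A's index loop that builds a character list and joins/compares it with a
-- single all-predicate over the zipped characters, returning the word directly (simpler).


-- ===== PORT A =====
-- Literal transliteration of A: build new_list over range(len(search_term)), join, compare.
def dot_checker (word : String) (search_term : String) : Option String :=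
  let wl := word.toList
  let sl := search_term.toList
  let new_list : List Char :=
    if sl.length = wl.length then
      (PySem.List.pyRange 0 (sl.length : Int) 1).foldl (fun acc i =>
        let s := PySem.List.pyGetD sl i ' '
        let w := PySem.List.pyGetD wl i ' '
        if s = w then acc ++ [w]
        else if s = '.' then acc ++ [w]
        else acc) []
    else []
  let result := String.ofList new_list
  if result ≠ "" then
    if word = result then some result else none
  else none

-- ===== PORT B =====
-- Literal transliteration of B: truthiness of word, equal lengths, all over zip.
def dot_checker_alt (word : String) (search_term : String) : Option String :=
  if word.toList ≠ [] ∧ word.toList.length = search_term.toList.length ∧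
      (word.toList.zip search_term.toList).all (fun p => p.2 == '.' || p.2 == p.1)
  then some word else none

-- ===== PRECONDITION & SPEC =====
def Spec_dot_checker (word : String) (search_term : String) (out : Option String) : Prop := out = dot_checker_alt word search_term
instance (word : String) (search_term : String) (out : Option String) : Decidable (Spec_dot_checker word search_term out) := by unfold Spec_dot_checker; infer_instance

-- ===== CLAIM (what is proved, stated in full; the proofs are below) =====
def Claim_equal_dot_checker : Prop := ∀ (word : String) (search_term : String), Dom_dot_checker word search_term → Spec_dot_checker word search_term (dot_checker word search_term)

-- ===== LEMMAS AND PROOFS =====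

-- A's range-indexed fold over the two equal-length lists is the fold over their zip.
theorem pv_fold_zip (wl sl : List Char) (h : sl.length = wl.length) :
    (PySem.List.pyRange 0 (sl.length : Int) 1).foldl (fun acc i =>
        let s := PySem.List.pyGetD sl i ' '
        let w := PySem.List.pyGetD wl i ' '
        if s = w then acc ++ [w]
        else if s = '.' then acc ++ [w]
        else acc) [] =
      (wl.zip sl).foldl (fun acc p =>
        if p.2 = p.1 ∨ p.2 = '.' then acc ++ [p.1] else acc) [] := by
  have hz : ((wl.zip sl).length : Int) = (sl.length : Int) := by
    simp [List.length_zip]; omega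
  rw [PySem.List.foldl_congr_mem _ _
      (fun acc (i : Int) =>
        (fun acc (p : Char × Char) => if p.2 = p.1 ∨ p.2 = '.' then acc ++ [p.1] else acc)
          acc (PySem.List.pyGetD (wl.zip sl) i (' ', ' '))) []
      (by
        intro acc i hi
        rw [PySem.List.mem_pyRange_one] at hi
        obtain ⟨h0, h1⟩ := hi
        have h2 : i < ((wl.zip sl).length : Int) := by omega
        have h3 : i < (wl.length : Int) := by rw [h] at h1; exact h1
        simp only [PySem.List.pyGetD_eq_getElem sl ' ' h0 h1,
          PySem.List.pyGetD_eq_getElem wl ' ' h0 h3,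
          PySem.List.pyGetD_eq_getElem (wl.zip sl) (' ', ' ') h0 h2,
          List.getElem_zip]
        split_ifs with c1 c2 c3 <;> simp_all)]
  rw [← hz]
  exact PySem.List.foldl_pyRange_zero_pyGetD' (wl.zip sl) (' ', ' ')
    (fun acc p => if p.2 = p.1 ∨ p.2 = '.' then acc ++ [p.1] else acc) []

-- the folded list is the filtered first projections of the zip
theorem pv_fold_filter (cs : List (Char × Char)) (acc : List Char) :
    cs.foldl (fun acc p => if p.2 = p.1 ∨ p.2 = '.' then acc ++ [p.1] else acc) acc =
      acc ++ (cs.filter (fun p => decide (p.2 = p.1 ∨ p.2 = '.'))).map Prod.fst := by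
  induction cs generalizing acc with
  | nil => simp
  | cons c cs ih =>
    by_cases h : c.2 = c.1 ∨ c.2 = '.' <;> simp [h, ih, List.append_assoc]

-- the filtered projection equals the whole word iff every pair satisfies the predicate
theorem pv_filter_eq_iff (wl sl : List Char) (h : sl.length = wl.length) :
    ((wl.zip sl).filter (fun p => decide (p.2 = p.1 ∨ p.2 = '.'))).map Prod.fst = wl ↔
      ∀ p ∈ wl.zip sl, p.2 = p.1 ∨ p.2 = '.' := by
  constructor
  · intro he p hp
    by_contra hnp
    have hlt : ((wl.zip sl).filter (fun p => decide (p.2 = p.1 ∨ p.2 = '.'))).length < (wl.zip sl).length :=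
      List.length_filter_lt_length_iff_exists.mpr ⟨p, hp, by simpa using hnp⟩
    have hzl : (wl.zip sl).length = wl.length := by rw [List.length_zip]; omega
    have hlen2 := congrArg List.length he
    rw [List.length_map] at hlen2
    omega
  · intro hall
    have hf : (wl.zip sl).filter (fun p => decide (p.2 = p.1 ∨ p.2 = '.')) = wl.zip sl :=
      List.filter_eq_self.mpr (fun p hp => by simpa using hall p hp)
    rw [hf, List.map_fst_zip]
    omega

-- ===== VERDICT (by name: the statement is the Claim_ definition above) =====
theorem dot_checker_spec : Claim_equal_dot_checker := by
  intro word search_term _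
  unfold Spec_dot_checker dot_checker dot_checker_alt
  dsimp only
  by_cases hlen : search_term.toList.length = word.toList.length
  · rw [if_pos hlen, pv_fold_zip _ _ hlen, pv_fold_filter, List.nil_append]
    by_cases hall : ∀ p ∈ word.toList.zip search_term.toList, p.2 = p.1 ∨ p.2 = '.'
    · rw [(pv_filter_eq_iff _ _ hlen).mpr hall, String.ofList_toList]
      have hallb : ((word.toList.zip search_term.toList).all
          fun p => p.2 == '.' || p.2 == p.1) = true := by
        rw [List.all_eq_true]
        intro p hp
        rcases hall p hp with h | h <;> simp [h]
      by_cases hw : word = ""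
      · subst hw
        simp
      · rw [if_pos hw, if_pos rfl, if_pos ⟨by simpa using hw, hlen.symm, hallb⟩]
    · have hne : ((word.toList.zip search_term.toList).filter
          (fun p => decide (p.2 = p.1 ∨ p.2 = '.'))).map Prod.fst ≠ word.toList :=
        fun he => hall ((pv_filter_eq_iff _ _ hlen).mp he)
      have hcond : ¬ (word.toList ≠ [] ∧ word.toList.length = search_term.toList.length ∧
          ((word.toList.zip search_term.toList).all fun p => p.2 == '.' || p.2 == p.1) = true) := by
        rintro ⟨-, -, h3⟩
        rw [List.all_eq_true] at h3
        exact hall (fun p hp => by have := h3 p hp; simp at this; tauto)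
      rw [if_neg hcond]
      split_ifs with c1 c2
      · exfalso
        have htl := congrArg String.toList c2
        rw [String.toList_ofList] at htl
        exact hne htl.symm
      · rfl
      · rfl
  · rw [if_neg hlen]
    rw [if_neg (by simp), if_neg (by rintro ⟨-, h2, -⟩; exact hlen h2.symm)]
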